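-- pv_equiv track=rewrite | github.com/bitnot/hackerrank-solutions | master/data-structures/data-structures/find-maximum-index-product/solution.py | solve
-- ===== SOURCE A (Python) =====
-- def get_left(values, n):
--     left = [0] * (n + 1)
--     for i in range(1, n + 1):
--         idx = i - 1
--         while(idx >= 1):
--             if values[idx] <= values[i]:
--                 idx = left[idx]
--             else:
--                 left[i] = idx
--                 break
--     return left
--
-- def get_right(values, n):
--     right = [0] * (n + 1)
--     for i in range(n, 0, -1):
--         idx = i + 1
--         while(idx <= n and idx > 0):
--             if values[idx] <= values[i]:
--                 idx = right[idx]
--             else: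
--                 right[i] = idx
--                 break
--     return right
--
-- def solve(arr):
--     n = len(arr)
--     values = [0] + arr
--     left = get_left(values, n)
--     right = get_right(values, n)
--     max_prod = 0
--     for i in range(1, n):
--         prod = left[i] * right[i]
--         max_prod = max(max_prod, prod)
--     return max_prod
-- ===== SOURCE B (Python) =====
-- def solve(arr):
--     # Monotonic-stack nearest-greater passes instead of jump pointers.
--     n = len(arr)
--     values = [0] + arr
--     left = [0] * (n + 1)
--     stack = []
--     for i in range(1, n + 1):
--         while stack and values[stack[-1]] <= values[i]:
--             stack.pop()
--         left[i] = stack[-1] if stack else 0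
--         stack.append(i)
--     right = [0] * (n + 1)
--     stack = []
--     for i in range(n, 0, -1):
--         while stack and values[stack[-1]] <= values[i]:
--             stack.pop()
--         right[i] = stack[-1] if stack else 0
--         stack.append(i)
--     ans = 0
--     for i in range(1, n + 1):
--         ans = max(ans, left[i] * right[i])
--     return ans
-- ===== Notes on version B (the rewrite author's own statement) =====
-- stated objective: idiomatic
-- what changed: The two nearest-greater passes are re-implemented with explicit monotonic stacks (pop while top value <= current, left/right[i] = remaining top or 0) instead of A's jump-pointer chains that chase previously computed left/right entries; B's final max loop runs over all indices 1..n (the extra term at n is always 0 since right[n]=0).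
import Mathlib
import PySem

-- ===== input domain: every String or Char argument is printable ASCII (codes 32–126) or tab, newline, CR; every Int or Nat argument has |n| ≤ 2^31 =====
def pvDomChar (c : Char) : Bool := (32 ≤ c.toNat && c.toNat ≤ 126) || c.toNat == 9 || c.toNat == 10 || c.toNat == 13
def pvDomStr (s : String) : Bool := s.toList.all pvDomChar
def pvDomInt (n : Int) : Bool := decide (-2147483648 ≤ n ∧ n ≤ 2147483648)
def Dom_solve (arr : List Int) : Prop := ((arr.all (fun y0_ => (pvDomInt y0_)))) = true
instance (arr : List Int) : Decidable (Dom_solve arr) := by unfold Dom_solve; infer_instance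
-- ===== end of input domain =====

-- B replaces A's jump-pointer nearest-greater passes by explicit monotonic stacks (idiomatic alternative, same asymptotic cost); return values proved equal.

-- ===== PORT A =====
-- inner `while` of get_left; `fuel` only makes the identical loop total (fuel = i suffices, proved
-- below); indexing via getD is exact here: every reachable index is nonnegative and in range
def whileLeft (values : List Int) (left : List Nat) (vi : Int) : Nat → Nat → Nat
  | 0, _ => 0
  | fuel+1, idx =>
    if 1 ≤ idx then
      if values.getD idx 0 ≤ vi then whileLeft values left vi fuel (left.getD idx 0)
      else idx
    else 0

def getLeft (values : List Int) (n : Nat) : List Nat :=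
  (List.range' 1 n).foldl
    (fun left i => left.set i (whileLeft values left (values.getD i 0) i (i - 1)))
    (List.replicate (n+1) 0)

-- inner `while` of get_right (condition `idx <= n and idx > 0`); fuel n+2 suffices (proved below)
def whileRight (values : List Int) (right : List Nat) (n : Nat) (vi : Int) : Nat → Nat → Nat
  | 0, _ => 0
  | fuel+1, idx =>
    if idx ≤ n ∧ 1 ≤ idx then
      if values.getD idx 0 ≤ vi then whileRight values right n vi fuel (right.getD idx 0)
      else idx
    else 0

-- `for i in range(n, 0, -1)` = reversed([1..n])
def getRight (values : List Int) (n : Nat) : List Nat :=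
  ((List.range' 1 n).reverse).foldl
    (fun right i => right.set i (whileRight values right n (values.getD i 0) (n+2) (i + 1)))
    (List.replicate (n+1) 0)

def solve (arr : List Int) : Int :=
  let n := arr.length
  let values := (0:Int) :: arr
  let left := getLeft values n
  let right := getRight values n
  (List.range' 1 (n-1)).foldl
    (fun maxProd i => max maxProd ((left.getD i 0 : Int) * (right.getD i 0 : Int))) 0

-- ===== PORT B =====
-- stack top = list head (Python's stack[-1]); popGo is the `while stack and values[stack[-1]] <= values[i]: stack.pop()` loop
def popGo (values : List Int) (vi : Int) : List Nat → List Nat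
  | [] => []
  | t :: rest => if values.getD t 0 ≤ vi then popGo values vi rest else t :: rest

-- `stack[-1] if stack else 0`
def topOr0 : List Nat → Nat
  | [] => 0
  | t :: _ => t

def buildLeft (values : List Int) (n : Nat) : List Nat :=
  ((List.range' 1 n).foldl
    (fun (st : List Nat × List Nat) i =>
      let s := popGo values (values.getD i 0) st.2
      (st.1.set i (topOr0 s), i :: s))
    (List.replicate (n+1) 0, [])).1

def buildRight (values : List Int) (n : Nat) : List Nat :=
  (((List.range' 1 n).reverse).foldl
    (fun (st : List Nat × List Nat) i =>
      let s := popGo values (values.getD i 0) st.2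
      (st.1.set i (topOr0 s), i :: s))
    (List.replicate (n+1) 0, [])).1

def solve_alt (arr : List Int) : Int :=
  let n := arr.length
  let values := (0:Int) :: arr
  let left := buildLeft values n
  let right := buildRight values n
  (List.range' 1 n).foldl
    (fun ans i => max ans ((left.getD i 0 : Int) * (right.getD i 0 : Int))) 0

-- ===== PRECONDITION & SPEC =====
def Spec_solve (arr : List Int) (out : Int) : Prop := out = solve_alt arr
instance (arr : List Int) (out : Int) : Decidable (Spec_solve arr out) := by unfold Spec_solve; infer_instance

-- ===== CLAIM (what is proved, stated in full; the proofs are below) =====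
def Claim_equal_solve : Prop := ∀ (arr : List Int), Dom_solve arr → Spec_solve arr (solve arr)

-- ===== LEMMAS AND PROOFS =====

-- the common specification: nearest strictly-greater element, scanning left / right
-- nglGo v x j = largest k ∈ [1, j] with x < v[k], else 0
def nglGo (v : List Int) (x : Int) : Nat → Nat
  | 0 => 0
  | j+1 => if x < v.getD (j+1) 0 then j+1 else nglGo v x j

-- ngrGo v x c j = smallest k ∈ [j, j+c) with x < v[k], else 0
def ngrGo (v : List Int) (x : Int) : Nat → Nat → Nat
  | 0, _ => 0
  | c+1, j => if x < v.getD j 0 then j else ngrGo v x (c) (j+1)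

def nglT (v : List Int) (j : Nat) : Nat := nglGo v (v.getD j 0) (j - 1)
def ngrT (v : List Int) (n j : Nat) : Nat := ngrGo v (v.getD j 0) (n - j) (j + 1)

-- list-access helpers
theorem getD_set0 (l : List Nat) (i j a : Nat) :
    (l.set i a).getD j 0 = if i = j ∧ j < l.length then a else l.getD j 0 := by
  by_cases h : i = j
  · subst h
    by_cases hl : i < l.length
    · simp [List.getD_eq_getElem?_getD, hl]
    · simp [List.getD_eq_getElem?_getD, hl]
  · simp [List.getD_eq_getElem?_getD, h]

theorem getD_replicate0 (m j : Nat) : (List.replicate m (0:Nat)).getD j 0 = 0 := by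
  simp only [List.getD_eq_getElem?_getD, List.getElem?_replicate]
  split <;> simp

-- basic facts about nglGo
theorem nglGo_le (v : List Int) (x : Int) (j : Nat) : nglGo v x j ≤ j := by
  induction j with
  | zero => simp [nglGo]
  | succ t ih => simp only [nglGo]; split <;> omega

theorem nglGo_between (v : List Int) (x : Int) (j : Nat) :
    ∀ k, nglGo v x j < k → k ≤ j → v.getD k 0 ≤ x := by
  induction j with
  | zero => omega
  | succ t ih =>
    intro k h1 h2
    simp only [nglGo] at h1
    split at h1
    · omega
    · rcases Nat.lt_or_ge k (t+1) with hk | hk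
      · exact ih k h1 (by omega)
      · have : k = t + 1 := by omega
        subst this; omega

theorem nglGo_skip (v : List Int) (x : Int) (j : Nat) :
    ∀ m, m ≤ j → (∀ k, m < k → k ≤ j → v.getD k 0 ≤ x) → nglGo v x j = nglGo v x m := by
  induction j with
  | zero =>
    intro m hm _
    have h0 : m = 0 := by omega
    rw [h0]
  | succ t ih =>
    intro m hm hall
    rcases Nat.eq_or_lt_of_le hm with h | h
    · rw [h]
    · have hv : v.getD (t+1) 0 ≤ x := hall (t+1) (by omega) (by omega)
      have : nglGo v x (t+1) = nglGo v x t := by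
        simp only [nglGo]; rw [if_neg (by omega)]
      rw [this]
      exact ih m (by omega) (fun k hk1 hk2 => hall k hk1 (by omega))

theorem nglT_le (v : List Int) (j : Nat) : nglT v j ≤ j - 1 := nglGo_le ..

-- basic facts about ngrGo
theorem ngrGo_bounds (v : List Int) (x : Int) :
    ∀ c j, ngrGo v x c j = 0 ∨ (j ≤ ngrGo v x c j ∧ ngrGo v x c j < j + c) := by
  intro c
  induction c with
  | zero => intro j; left; rfl
  | succ t ih =>
    intro j
    simp only [ngrGo]
    split
    · right; omega
    · rcases ih (j+1) with h | h
      · left; exact h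
      · right; omega

theorem ngrGo_between (v : List Int) (x : Int) :
    ∀ c j k, j ≤ k → k < ngrGo v x c j → v.getD k 0 ≤ x := by
  intro c
  induction c with
  | zero => intro j k _ h; simp [ngrGo] at h
  | succ t ih =>
    intro j k hjk h
    simp only [ngrGo] at h
    split at h <;> rename_i hc
    · omega
    · rcases Nat.eq_or_lt_of_le hjk with he | hl
      · subst he; omega
      · exact ih (j+1) k hl h

theorem ngrGo_zero_all (v : List Int) (x : Int) :
    ∀ c j, 1 ≤ j → ngrGo v x c j = 0 → ∀ k, j ≤ k → k < j + c → v.getD k 0 ≤ x := by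
  intro c
  induction c with
  | zero => omega
  | succ t ih =>
    intro j hj h k hk1 hk2
    simp only [ngrGo] at h
    split at h <;> rename_i hc
    · omega
    · rcases Nat.eq_or_lt_of_le hk1 with he | hl
      · subst he; omega
      · exact ih (j+1) (by omega) h k hl (by omega)

theorem ngrGo_all_zero (v : List Int) (x : Int) :
    ∀ c j, (∀ k, j ≤ k → k < j + c → v.getD k 0 ≤ x) → ngrGo v x c j = 0 := by
  intro c
  induction c with
  | zero => intro j _; rfl
  | succ t ih =>
    intro j hall
    simp only [ngrGo]
    rw [if_neg (by have := hall j (le_refl j) (by omega); omega)]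
    exact ih (j+1) (fun k h1 h2 => hall k (by omega) (by omega))

theorem ngrGo_skip (v : List Int) (x : Int) :
    ∀ c j m, j ≤ m → m ≤ j + c → (∀ k, j ≤ k → k < m → v.getD k 0 ≤ x) →
      ngrGo v x c j = ngrGo v x (j + c - m) m := by
  intro c
  induction c with
  | zero =>
    intro j m h1 h2 _
    have : m = j := by omega
    subst this; simp
  | succ t ih =>
    intro j m h1 h2 hall
    rcases Nat.eq_or_lt_of_le h1 with he | hl
    · subst he; congr 1; omega
    · have hv : v.getD j 0 ≤ x := hall j (le_refl j) hl
      have : ngrGo v x (t+1) j = ngrGo v x t (j+1) := by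
        simp only [ngrGo]; rw [if_neg (by omega)]
      rw [this, ih (j+1) m (by omega) (by omega) (fun k hk1 hk2 => hall k (by omega) hk2)]
      congr 1; omega

theorem ngrT_bounds (v : List Int) (n j : Nat) :
    ngrT v n j = 0 ∨ (j + 1 ≤ ngrT v n j ∧ ngrT v n j ≤ n) := by
  unfold ngrT
  rcases ngrGo_bounds v (v.getD j 0) (n - j) (j+1) with h | h
  · left; exact h
  · rcases Nat.le_total j n |>.imp id (fun h => h) with hj | hj
    · right; omega
    · left; have : n - j = 0 := by omega
      rw [this] at *; rfl

-- ===== A's left pass computes nglT =====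
theorem whileLeft_eq (v : List Int) (x : Int) :
    ∀ (fuel idx : Nat) (L : List Nat), idx < fuel →
      (∀ j, 1 ≤ j → j ≤ idx → L.getD j 0 = nglT v j) →
      whileLeft v L x fuel idx = nglGo v x idx := by
  intro fuel
  induction fuel with
  | zero => omega
  | succ f ih =>
    intro idx L hf hT
    match idx with
    | 0 => simp [whileLeft, nglGo]
    | t+1 =>
      simp only [whileLeft]
      rw [if_pos (by omega)]
      by_cases hle : v.getD (t+1) 0 ≤ x
      · rw [if_pos hle]
        rw [hT (t+1) (by omega) (le_refl _)]
        have hr : nglT v (t+1) ≤ t := by have := nglT_le v (t+1); omega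
        rw [ih (nglT v (t+1)) L (by omega)
            (fun j h1 h2 => hT j h1 (by omega))]
        have step : nglGo v x (t+1) = nglGo v x t := by
          simp only [nglGo]; rw [if_neg (by omega)]
        rw [step]
        refine (nglGo_skip v x t (nglT v (t+1)) hr ?_).symm
        intro k hk1 hk2
        have hb : v.getD k 0 ≤ v.getD (t+1) 0 := by
          have := nglGo_between v (v.getD (t+1) 0) t k
          exact this (by simpa [nglT] using hk1) hk2
        omega
      · rw [if_neg hle]
        simp only [nglGo]; rw [if_pos (by omega)]

theorem getLeft_spec (v : List Int) (n : Nat) :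
    ∀ m, m ≤ n →
      ((List.range' 1 m).foldl
        (fun left i => left.set i (whileLeft v left (v.getD i 0) i (i - 1)))
        (List.replicate (n+1) 0)).length = n + 1 ∧
      ∀ j, ((List.range' 1 m).foldl
        (fun left i => left.set i (whileLeft v left (v.getD i 0) i (i - 1)))
        (List.replicate (n+1) 0)).getD j 0 = if 1 ≤ j ∧ j ≤ m then nglT v j else 0 := by
  intro m
  induction m with
  | zero =>
    intro _
    constructor
    · simp
    · intro j; rw [if_neg (by omega)]; exact getD_replicate0 _ _
  | succ t ih =>
    intro hm
    obtain ⟨hlen, htab⟩ := ih (by omega)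
    have hconcat : List.range' 1 (t+1) = List.range' 1 t ++ [t+1] := by
      have h := List.range'_concat (step := 1) (s := 1) (n := t)
      simpa [Nat.add_comm] using h
    rw [hconcat, List.foldl_append]
    simp only [List.foldl_cons, List.foldl_nil]
    set Lt := (List.range' 1 t).foldl
        (fun left i => left.set i (whileLeft v left (v.getD i 0) i (i - 1)))
        (List.replicate (n+1) 0) with hLt
    have hwl : whileLeft v Lt (v.getD (t+1) 0) (t+1) ((t+1) - 1) = nglGo v (v.getD (t+1) 0) t := by
      apply whileLeft_eq
      · omega
      · intro j h1 h2
        rw [htab j, if_pos ⟨h1, by omega⟩]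
    constructor
    · rw [List.length_set, hlen]
    · intro j
      rw [getD_set0, hlen]
      by_cases hj : t + 1 = j ∧ j < n + 1
      · rw [if_pos hj, if_pos (by omega)]
        rw [hwl]
        have : j = t + 1 := by omega
        subst this
        rfl
      · rw [if_neg hj, htab j]
        by_cases h1 : 1 ≤ j ∧ j ≤ t
        · rw [if_pos h1, if_pos (by omega)]
        · rw [if_neg h1, if_neg (by omega)]

-- ===== A's right pass computes ngrT =====
theorem whileRight_eq (v : List Int) (n : Nat) (x : Int) :
    ∀ (fuel idx : Nat) (R : List Nat), 1 ≤ idx → n + 2 - idx ≤ fuel →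
      (∀ j, idx ≤ j → j ≤ n → R.getD j 0 = ngrT v n j) →
      whileRight v R n x fuel idx = ngrGo v x (n + 1 - idx) idx := by
  intro fuel
  induction fuel with
  | zero =>
    intro idx R h1 h2 _
    have : n + 1 - idx = 0 := by omega
    rw [this]; rfl
  | succ f ih =>
    intro idx R h1 hf hT
    by_cases hn : idx ≤ n
    · simp only [whileRight]
      rw [if_pos ⟨hn, h1⟩]
      have hc : n + 1 - idx = (n - idx) + 1 := by omega
      by_cases hle : v.getD idx 0 ≤ x
      · rw [if_pos hle]
        rw [hT idx (le_refl _) hn]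
        have hrdef : ngrT v n idx = ngrGo v (v.getD idx 0) (n - idx) (idx + 1) := rfl
        have hstep : ngrGo v x (n + 1 - idx) idx = ngrGo v x (n - idx) (idx + 1) := by
          rw [hc]; simp only [ngrGo]; rw [if_neg (by omega)]
        rcases ngrT_bounds v n idx with hr0 | hrb
        · -- popped chain is empty: everything to the right is ≤ x
          rw [hr0, hstep]
          have hall : ∀ k, idx + 1 ≤ k → k < idx + 1 + (n - idx) → v.getD k 0 ≤ x := by
            intro k hk1 hk2
            have := ngrGo_zero_all v (v.getD idx 0) (n - idx) (idx+1) (by omega)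
              (hrdef ▸ hr0) k hk1 hk2
            omega
          rw [ngrGo_all_zero v x _ _ hall]
          match f, (by omega : 1 ≤ f) with
          | g+1, _ => simp [whileRight]
        · rw [hstep]
          have hskip : ngrGo v x (n - idx) (idx + 1) = ngrGo v x (n + 1 - ngrT v n idx) (ngrT v n idx) := by
            have := ngrGo_skip v x (n - idx) (idx + 1) (ngrT v n idx) (by omega) (by omega)
              (fun k hk1 hk2 => by
                have := ngrGo_between v (v.getD idx 0) (n - idx) (idx + 1) k hk1 (hrdef ▸ hk2)
                omega)
            rw [this]; congr 1; omega
          rw [hskip]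
          exact ih (ngrT v n idx) R (by omega) (by omega)
            (fun j hj1 hj2 => hT j (by omega) hj2)
      · rw [if_neg hle]
        rw [hc]; simp only [ngrGo]; rw [if_pos (by omega)]
    · simp only [whileRight]
      rw [if_neg (by omega)]
      have : n + 1 - idx = 0 := by omega
      rw [this]; rfl

theorem getRight_spec (v : List Int) (n : Nat) :
    ∀ k a, 1 ≤ a → a + k = n + 1 →
      ((List.range' a k).foldr
        (fun i right => right.set i (whileRight v right n (v.getD i 0) (n+2) (i + 1)))
        (List.replicate (n+1) 0)).length = n + 1 ∧
      ∀ j, ((List.range' a k).foldr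
        (fun i right => right.set i (whileRight v right n (v.getD i 0) (n+2) (i + 1)))
        (List.replicate (n+1) 0)).getD j 0 = if a ≤ j ∧ j ≤ n then ngrT v n j else 0 := by
  intro k
  induction k with
  | zero =>
    intro a ha hk
    constructor
    · simp
    · intro j; rw [if_neg (by omega)]; exact getD_replicate0 _ _
  | succ t ih =>
    intro a ha hk
    obtain ⟨hlen, htab⟩ := ih (a+1) (by omega) (by omega)
    rw [List.range'_succ, List.foldr_cons]
    have hwr : ∀ R : List Nat,
        (∀ j, a + 1 ≤ j → j ≤ n → R.getD j 0 = ngrT v n j) →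
        whileRight v R n (v.getD a 0) (n+2) (a + 1) = ngrT v n a := by
      intro R hTab
      rw [whileRight_eq v n (v.getD a 0) (n+2) (a+1) R (by omega) (by omega) hTab]
      unfold ngrT
      congr 1
      omega
    constructor
    · rw [List.length_set, hlen]
    · intro j
      rw [getD_set0, hlen]
      rw [hwr _ (fun j h1 h2 => by rw [htab j, if_pos ⟨h1, h2⟩])]
      by_cases hj : a = j ∧ j < n + 1
      · rw [if_pos hj, if_pos (by omega)]
        have : j = a := by omega
        subst this; rfl
      · rw [if_neg hj, htab j]
        by_cases h1 : a + 1 ≤ j ∧ j ≤ n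
        · rw [if_pos h1, if_pos (by omega)]
        · rw [if_neg h1, if_neg (by omega)]

-- ===== B's stacks are the chains of iterated nearest-greater jumps =====
def chainL (v : List Int) : Nat → Nat → List Nat
  | 0, _ => []
  | f+1, j => if j = 0 then [] else j :: chainL v f (nglT v j)

def chainR (v : List Int) (n : Nat) : Nat → Nat → List Nat
  | 0, _ => []
  | f+1, j => if j = 0 ∨ n + 1 ≤ j then [] else j :: chainR v n f (ngrT v n j)

theorem chainL_zero (v : List Int) (f : Nat) : chainL v f 0 = [] := by
  cases f <;> simp [chainL]

theorem chainL_fuel (v : List Int) :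
    ∀ f f' j, j ≤ f → j ≤ f' → chainL v f j = chainL v f' j := by
  intro f
  induction f with
  | zero =>
    intro f' j h _
    have : j = 0 := by omega
    subst this
    rw [chainL_zero, chainL_zero]
  | succ g ih =>
    intro f' j h h'
    match j with
    | 0 => rw [chainL_zero, chainL_zero]
    | t+1 =>
      match f', h' with
      | s+1, _ =>
        simp only [chainL, if_neg (by omega : ¬ t + 1 = 0)]
        have hlt : nglT v (t+1) ≤ t := by have := nglT_le v (t+1); omega
        rw [ih s (nglT v (t+1)) (by omega) (by omega)]

theorem chainL_topOr0 (v : List Int) (f j : Nat) (h : j ≤ f) :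
    topOr0 (chainL v f j) = j := by
  match j with
  | 0 => rw [chainL_zero]; rfl
  | t+1 =>
    match f, h with
    | s+1, _ =>
      simp only [chainL, if_neg (by omega : ¬ t + 1 = 0)]
      rfl

theorem popGo_chainL (v : List Int) (x : Int) :
    ∀ f j, j ≤ f → popGo v x (chainL v f j) = chainL v f (nglGo v x j) := by
  intro f
  induction f with
  | zero =>
    intro j h
    have : j = 0 := by omega
    subst this
    rw [chainL_zero]
    simp [popGo, nglGo, chainL_zero]
  | succ g ih =>
    intro j h
    match j with
    | 0 => rw [chainL_zero]; simp [popGo, nglGo, chainL_zero]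
    | t+1 =>
      simp only [chainL, if_neg (by omega : ¬ t + 1 = 0)]
      have hlt : nglT v (t+1) ≤ t := by have := nglT_le v (t+1); omega
      by_cases hle : v.getD (t+1) 0 ≤ x
      · simp only [popGo, if_pos hle]
        rw [ih (nglT v (t+1)) (by omega)]
        have h1 : nglGo v x (nglT v (t+1)) = nglGo v x t := by
          refine (nglGo_skip v x t (nglT v (t+1)) hlt ?_).symm
          intro k hk1 hk2
          have hb := nglGo_between v (v.getD (t+1) 0) t k (by simpa [nglT] using hk1) hk2
          omega
        have h2 : nglGo v x (t+1) = nglGo v x t := by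
          simp only [nglGo]; rw [if_neg (by omega)]
        rw [h1, h2]
        exact chainL_fuel v g (g+1) (nglGo v x t)
          (by have := nglGo_le v x t; omega) (by have := nglGo_le v x t; omega)
      · simp only [popGo, if_neg hle]
        have h2 : nglGo v x (t+1) = t + 1 := by
          simp only [nglGo]; rw [if_pos (by omega)]
        rw [h2]
        simp only [if_neg (by omega : ¬ t + 1 = 0)]

theorem buildLeft_spec (v : List Int) (n : Nat) :
    ∀ m, m ≤ n →
      (((List.range' 1 m).foldl
        (fun (st : List Nat × List Nat) i =>
          let s := popGo v (v.getD i 0) st.2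
          (st.1.set i (topOr0 s), i :: s))
        (List.replicate (n+1) 0, [])).1.length = n + 1) ∧
      (∀ j, ((List.range' 1 m).foldl
        (fun (st : List Nat × List Nat) i =>
          let s := popGo v (v.getD i 0) st.2
          (st.1.set i (topOr0 s), i :: s))
        (List.replicate (n+1) 0, [])).1.getD j 0 = if 1 ≤ j ∧ j ≤ m then nglT v j else 0) ∧
      ((List.range' 1 m).foldl
        (fun (st : List Nat × List Nat) i =>
          let s := popGo v (v.getD i 0) st.2
          (st.1.set i (topOr0 s), i :: s))
        (List.replicate (n+1) 0, [])).2 = chainL v n m := by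
  intro m
  induction m with
  | zero =>
    intro _
    refine ⟨by simp, fun j => by rw [if_neg (by omega)]; exact getD_replicate0 _ _, ?_⟩
    rw [chainL_zero]; rfl
  | succ t ih =>
    intro hm
    obtain ⟨hlen, htab, hstk⟩ := ih (by omega)
    have hconcat : List.range' 1 (t+1) = List.range' 1 t ++ [t+1] := by
      have h := List.range'_concat (step := 1) (s := 1) (n := t)
      simpa [Nat.add_comm] using h
    rw [hconcat, List.foldl_append]
    simp only [List.foldl_cons, List.foldl_nil]
    rw [hstk]
    have hpop : popGo v (v.getD (t+1) 0) (chainL v n t) = chainL v n (nglT v (t+1)) := by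
      rw [popGo_chainL v (v.getD (t+1) 0) n t (by omega)]
      rfl
    have hlt : nglT v (t+1) ≤ t := by have := nglT_le v (t+1); omega
    have htop : topOr0 (chainL v n (nglT v (t+1))) = nglT v (t+1) :=
      chainL_topOr0 v n (nglT v (t+1)) (by omega)
    refine ⟨by simpa [List.length_set] using hlen, ?_, ?_⟩
    · intro j
      simp only [hpop, htop]
      rw [getD_set0, hlen]
      by_cases hj : t + 1 = j ∧ j < n + 1
      · rw [if_pos hj, if_pos (by omega)]
        have : j = t + 1 := by omega
        subst this; rfl
      · rw [if_neg hj, htab j]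
        by_cases h1 : 1 ≤ j ∧ j ≤ t
        · rw [if_pos h1, if_pos (by omega)]
        · rw [if_neg h1, if_neg (by omega)]
    · simp only [hpop]
      match n, hm with
      | s+1, _ =>
        have : chainL v (s+1) (t+1) = (t+1) :: chainL v s (nglT v (t+1)) := by
          simp only [chainL, if_neg (by omega : ¬ t + 1 = 0)]
        rw [this]
        congr 1
        exact chainL_fuel v (s+1) s (nglT v (t+1)) (by omega) (by omega)

theorem chainR_zero (v : List Int) (n f : Nat) : chainR v n f 0 = [] := by
  cases f <;> simp [chainR]

theorem chainR_hi (v : List Int) (n f j : Nat) (h : n + 1 ≤ j) : chainR v n f j = [] := by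
  cases f with
  | zero => rfl
  | succ g => simp only [chainR]; rw [if_pos (Or.inr h)]

theorem chainR_cons (v : List Int) (n f j : Nat) (h1 : 1 ≤ j) (h2 : j ≤ n) :
    chainR v n (f+1) j = j :: chainR v n f (ngrT v n j) := by
  simp only [chainR]; rw [if_neg (by omega)]

theorem chainR_fuel (v : List Int) (n : Nat) :
    ∀ f f' j, n + 1 - j ≤ f → n + 1 - j ≤ f' → chainR v n f j = chainR v n f' j := by
  intro f
  induction f with
  | zero =>
    intro f' j h _
    rw [chainR_hi v n 0 j (by omega), chainR_hi v n f' j (by omega)]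
  | succ g ih =>
    intro f' j h h'
    by_cases hj0 : j = 0
    · subst hj0; rw [chainR_zero, chainR_zero]
    · by_cases hhi : n + 1 ≤ j
      · rw [chainR_hi v n _ j hhi, chainR_hi v n f' j hhi]
      · match f', (by omega : 1 ≤ f') with
        | s+1, _ =>
          simp only [chainR, if_neg (by omega : ¬ (j = 0 ∨ n + 1 ≤ j))]
          rcases ngrT_bounds v n j with hr | hr
          · rw [hr, chainR_zero, chainR_zero]
          · rw [ih s (ngrT v n j) (by omega) (by omega)]

theorem chainR_topOr0 (v : List Int) (n f j : Nat) (hj : j ≤ n) (hf : n + 1 - j ≤ f) :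
    topOr0 (chainR v n f j) = j := by
  by_cases hj0 : j = 0
  · subst hj0; rw [chainR_zero]; rfl
  · match f, (by omega : 1 ≤ f) with
    | s+1, _ =>
      simp only [chainR, if_neg (by omega : ¬ (j = 0 ∨ n + 1 ≤ j))]
      rfl

theorem popGo_chainR (v : List Int) (n : Nat) (x : Int) :
    ∀ f j, 1 ≤ j → n + 1 - j ≤ f →
      popGo v x (chainR v n f j) = chainR v n f (ngrGo v x (n + 1 - j) j) := by
  intro f
  induction f with
  | zero =>
    intro j _ h
    have hc : n + 1 - j = 0 := by omega
    rw [hc, chainR_hi v n 0 j (by omega)]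
    simp [popGo, ngrGo, chainR_zero]
  | succ g ih =>
    intro j hj1 hf
    by_cases hhi : n + 1 ≤ j
    · have hc : n + 1 - j = 0 := by omega
      rw [hc, chainR_hi v n _ j hhi]
      simp [popGo, ngrGo, chainR_zero]
    · rw [chainR_cons v n g j (by omega) (by omega)]
      have hc : n + 1 - j = (n - j) + 1 := by omega
      by_cases hle : v.getD j 0 ≤ x
      · simp only [popGo, if_pos hle]
        have hstep : ngrGo v x (n + 1 - j) j = ngrGo v x (n - j) (j + 1) := by
          rw [hc]; simp only [ngrGo]; rw [if_neg (by omega)]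
        rcases ngrT_bounds v n j with hr | hr
        · rw [hr, chainR_zero]
          simp only [popGo]
          have hall : ∀ k, j + 1 ≤ k → k < j + 1 + (n - j) → v.getD k 0 ≤ x := by
            intro k hk1 hk2
            have := ngrGo_zero_all v (v.getD j 0) (n - j) (j+1) (by omega) hr k hk1 hk2
            omega
          rw [hstep, ngrGo_all_zero v x _ _ hall, chainR_zero]
        · rw [ih (ngrT v n j) (by omega) (by omega)]
          have hskip : ngrGo v x (n + 1 - j) j = ngrGo v x (n + 1 - ngrT v n j) (ngrT v n j) := by
            rw [hstep]
            have hs := ngrGo_skip v x (n - j) (j + 1) (ngrT v n j) (by omega) (by omega)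
              (fun k hk1 hk2 => by
                have := ngrGo_between v (v.getD j 0) (n - j) (j + 1) k hk1 (by simpa [ngrT] using hk2)
                omega)
            rw [hs]; congr 1; omega
          rw [← hskip]
          rcases ngrGo_bounds v x (n + 1 - ngrT v n j) (ngrT v n j) with hw | hw
          · rw [hskip, hw, chainR_zero, chainR_zero]
          · rw [hskip]
            exact chainR_fuel v n g (g+1) _ (by omega) (by omega)
      · simp only [popGo, if_neg hle]
        have : ngrGo v x (n + 1 - j) j = j := by
          rw [hc]; simp only [ngrGo]; rw [if_pos (by omega)]
        rw [this, chainR_cons v n g j (by omega) (by omega)]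

theorem buildRight_spec (v : List Int) (n : Nat) :
    ∀ k a, 1 ≤ a → a + k = n + 1 →
      (((List.range' a k).foldr
        (fun i (st : List Nat × List Nat) =>
          let s := popGo v (v.getD i 0) st.2
          (st.1.set i (topOr0 s), i :: s))
        (List.replicate (n+1) 0, [])).1.length = n + 1) ∧
      (∀ j, ((List.range' a k).foldr
        (fun i (st : List Nat × List Nat) =>
          let s := popGo v (v.getD i 0) st.2
          (st.1.set i (topOr0 s), i :: s))
        (List.replicate (n+1) 0, [])).1.getD j 0 = if a ≤ j ∧ j ≤ n then ngrT v n j else 0) ∧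
      ((List.range' a k).foldr
        (fun i (st : List Nat × List Nat) =>
          let s := popGo v (v.getD i 0) st.2
          (st.1.set i (topOr0 s), i :: s))
        (List.replicate (n+1) 0, [])).2 = chainR v n (n+1) a := by
  intro k
  induction k with
  | zero =>
    intro a ha hk
    refine ⟨by simp, fun j => by rw [if_neg (by omega)]; exact getD_replicate0 _ _, ?_⟩
    rw [chainR_hi v n (n+1) a (by omega)]; rfl
  | succ t ih =>
    intro a ha hk
    obtain ⟨hlen, htab, hstk⟩ := ih (a+1) (by omega) (by omega)
    rw [List.range'_succ, List.foldr_cons]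
    rw [hstk]
    have hpop : popGo v (v.getD a 0) (chainR v n (n+1) (a+1)) = chainR v n (n+1) (ngrT v n a) := by
      rw [popGo_chainR v n (v.getD a 0) (n+1) (a+1) (by omega) (by omega)]
      congr 1
      unfold ngrT
      congr 1
      omega
    have hrb : ngrT v n a ≤ n := by
      rcases ngrT_bounds v n a with h | h <;> omega
    have htop : topOr0 (chainR v n (n+1) (ngrT v n a)) = ngrT v n a :=
      chainR_topOr0 v n (n+1) (ngrT v n a) hrb (by omega)
    refine ⟨by simpa [List.length_set] using hlen, ?_, ?_⟩
    · intro j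
      simp only [hpop, htop]
      rw [getD_set0, hlen]
      by_cases hj : a = j ∧ j < n + 1
      · rw [if_pos hj, if_pos (by omega)]
        have : j = a := by omega
        subst this; rfl
      · rw [if_neg hj, htab j]
        by_cases h1 : a + 1 ≤ j ∧ j ≤ n
        · rw [if_pos h1, if_pos (by omega)]
        · rw [if_neg h1, if_neg (by omega)]
    · simp only [hpop]
      have ha_n : a ≤ n := by omega
      have : chainR v n (n+1) a = a :: chainR v n n (ngrT v n a) := by
        simp only [chainR, if_neg (by omega : ¬ (a = 0 ∨ n + 1 ≤ a))]
      rw [this]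
      congr 1
      rcases ngrT_bounds v n a with hr | hr
      · rw [hr, chainR_zero, chainR_zero]
      · exact chainR_fuel v n (n+1) n (ngrT v n a) (by omega) (by omega)

-- ===== assembling the two solves =====
theorem le_foldl_max (g : Nat → Int) :
    ∀ (l : List Nat) (b : Int), b ≤ l.foldl (fun m i => max m (g i)) b := by
  intro l
  induction l with
  | nil => intro b; exact le_refl b
  | cons a l ih =>
    intro b
    simp only [List.foldl_cons]
    exact le_trans (le_max_left b (g a)) (ih (max b (g a)))

theorem solves_eq (v : List Int) (n : Nat) :
    (List.range' 1 (n-1)).foldl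
      (fun maxProd i => max maxProd (((getLeft v n).getD i 0 : Int) * ((getRight v n).getD i 0 : Int))) 0
    = (List.range' 1 n).foldl
      (fun ans i => max ans (((buildLeft v n).getD i 0 : Int) * ((buildRight v n).getD i 0 : Int))) 0 := by
  obtain ⟨_, hLA⟩ := getLeft_spec v n n (le_refl n)
  obtain ⟨_, hRA⟩ := getRight_spec v n n 1 (le_refl 1) (by omega)
  obtain ⟨_, hLB, _⟩ := buildLeft_spec v n n (le_refl n)
  obtain ⟨_, hRB, _⟩ := buildRight_spec v n n 1 (le_refl 1) (by omega)
  have hgr : getRight v n = (List.range' 1 n).foldr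
      (fun i right => right.set i (whileRight v right n (v.getD i 0) (n+2) (i + 1)))
      (List.replicate (n+1) 0) := by
    unfold getRight
    rw [List.foldl_reverse]
  have hbr : buildRight v n = ((List.range' 1 n).foldr
      (fun i (st : List Nat × List Nat) =>
        let s := popGo v (v.getD i 0) st.2
        (st.1.set i (topOr0 s), i :: s))
      (List.replicate (n+1) 0, [])).1 := by
    unfold buildRight
    rw [List.foldl_reverse]
  have hL : ∀ j, (getLeft v n).getD j 0 = (buildLeft v n).getD j 0 := by
    intro j
    unfold getLeft buildLeft
    rw [hLA j, hLB j]
  have hR : ∀ j, (getRight v n).getD j 0 = (buildRight v n).getD j 0 := by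
    intro j
    rw [hgr, hRA j, hbr, hRB j]
  have hfun : (fun (maxProd : Int) (i : Nat) =>
        max maxProd (((getLeft v n).getD i 0 : Int) * ((getRight v n).getD i 0 : Int)))
      = (fun (ans : Int) (i : Nat) =>
        max ans (((buildLeft v n).getD i 0 : Int) * ((buildRight v n).getD i 0 : Int))) := by
    funext m i
    rw [hL i, hR i]
  rw [hfun]
  -- A's final loop misses i = n, whose term is 0 because right[n] = 0
  match n, hRB, hbr with
  | 0, _, _ => rfl
  | s+1, hRB, hbr =>
    have hconcat : List.range' 1 (s+1) = List.range' 1 s ++ [s+1] := by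
      have h := List.range'_concat (step := 1) (s := 1) (n := s)
      simpa [Nat.add_comm] using h
    rw [show (s+1) - 1 = s from by omega, hconcat, List.foldl_append]
    simp only [List.foldl_cons, List.foldl_nil]
    have hRn : (buildRight v (s+1)).getD (s+1) 0 = 0 := by
      rw [hbr, hRB (s+1), if_pos (by omega)]
      unfold ngrT
      rw [show (s+1) - (s+1) = 0 from by omega]
      rfl
    rw [hRn]
    have h0 : (0:Int) ≤ (List.range' 1 s).foldl
        (fun ans i => max ans (((buildLeft v (s+1)).getD i 0 : Int) * ((buildRight v (s+1)).getD i 0 : Int))) 0 :=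
      le_foldl_max _ _ _
    simp only [Nat.cast_zero, mul_zero]
    omega

theorem solve_spec : Claim_equal_solve := by
  intro arr _
  unfold Spec_solve
  dsimp only [solve, solve_alt]
  exact solves_eq ((0:Int) :: arr) arr.length
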